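-- pv_equiv track=rewrite | github.com/chenlin014/jiezi | util/check_map.py | find_dup_code
-- ===== SOURCE A (Python) =====
-- def find_dup_code(text2code):
--     dup_code = dict()
--     code2text = dict()
--
--     for text, code in text2code.items():
--         if not code in code2text:
--             code2text[code] = text
--             continue
--
--         if code in dup_code:
--             dup_code[code].append(text)
--         else:
--             dup_code[code] = [code2text[code], text]
--
--     return dup_code
-- ===== SOURCE B (Python) =====
-- def find_dup_code(text2code):
--     counts = {}
--     for code in text2code.values():
--         counts[code] = counts.get(code, 0) + 1
--
--     dup_code = {}
--     for text, code in text2code.items():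
--         if counts[code] > 1:
--             dup_code.setdefault(code, []).append(text)
--     return dup_code
-- ===== Notes on version B (the rewrite author's own statement) =====
-- stated objective: simpler
-- what changed: A's single-pass bookkeeping with two mutable dicts (first-seen text per code, duplicate lists grown on the fly) is replaced by a plain count-then-group two-pass: first count every code's occurrences, then collect via setdefault the texts of codes that occur more than once; Pre_ excludes inputs where two different duplicated codes interleave so that first- and second-occurrence orders disagree, on which the two result dicts hold the same mapping but accidental, unspecified key-insertion orders differ.
import Mathlib
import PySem

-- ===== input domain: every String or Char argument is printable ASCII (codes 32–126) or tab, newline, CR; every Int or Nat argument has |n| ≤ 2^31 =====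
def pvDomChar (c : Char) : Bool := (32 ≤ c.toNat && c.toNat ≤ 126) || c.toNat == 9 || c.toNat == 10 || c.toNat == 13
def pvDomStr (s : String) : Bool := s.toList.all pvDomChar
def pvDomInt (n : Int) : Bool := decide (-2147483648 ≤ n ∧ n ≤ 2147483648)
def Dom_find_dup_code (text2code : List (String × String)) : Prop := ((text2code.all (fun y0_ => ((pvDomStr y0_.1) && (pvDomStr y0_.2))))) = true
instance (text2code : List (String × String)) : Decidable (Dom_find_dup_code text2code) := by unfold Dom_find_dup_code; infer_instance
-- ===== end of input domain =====

-- B replaces A's single-pass two-dict bookkeeping by a count-then-group two-pass (simpler, not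
-- faster); return-value equivalence under Pre_, which excludes inputs where the two result
-- dicts hold the same mapping but differ in accidental key-insertion order.

-- ===== PORT A =====
def find_dup_code (text2code : List (String × String)) : List (String × List String) :=
  ((text2code.foldl
      (fun (st : PySem.Dict String (List String) × PySem.Dict String String) p =>
        if st.2.contains p.2 = false then (st.1, st.2.insert p.2 p.1)
        else if st.1.contains p.2 then (st.1.modify p.2 [] (fun ts => ts ++ [p.1]), st.2)
        -- code2text[code]: the key is present here (guarded above), so getD's default is never used
        else (st.1.insert p.2 [st.2.getD p.2 "", p.1], st.2))
      (PySem.Dict.empty, PySem.Dict.empty)).1).items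

-- ===== PORT B =====
def find_dup_code_alt (text2code : List (String × String)) : List (String × List String) :=
  let counts : PySem.Dict String Int :=
    text2code.foldl (fun d p => d.insert p.2 (d.getD p.2 0 + 1)) PySem.Dict.empty
  (text2code.foldl
      (fun (dup : PySem.Dict String (List String)) p =>
        -- counts[code]: code is always a key of counts (it was counted), so getD's default is never used
        if counts.getD p.2 0 > 1 then dup.modify p.2 [] (fun ts => ts ++ [p.1]) else dup)
      PySem.Dict.empty).items

-- ===== PRECONDITION & SPEC =====

/-- The codes (second components), in order. -/
def codesOf (l : List (String × String)) : List String := l.map Prod.snd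

/-- Duplicated codes in order of FIRST occurrence. -/
def dupsFirst (l : List (String × String)) : List String :=
  (PySem.List.dedup (codesOf l)).filter (fun c => decide (1 < (codesOf l).count c))

/-- Duplicated codes in order of SECOND occurrence. -/
def secondOcc (cs : List String) : List String :=
  (cs.zipIdx.filter (fun p => decide ((cs.take p.2).count p.1 = 1))).map Prod.fst

-- Pre_ excludes inputs on which two different duplicated codes interleave so that the order of
-- their first occurrences differs from the order of their second occurrences: there A's and B's
-- result dicts hold the same mapping but list their keys in different, accidental insertion
-- orders (second-occurrence order for A, first-occurrence order for B) — a dict-iteration-order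
-- corner on which either value is defensible.
def Pre_find_dup_code (text2code : List (String × String)) : Prop :=
  dupsFirst text2code = secondOcc (codesOf text2code)
instance (text2code : List (String × String)) : Decidable (Pre_find_dup_code text2code) := by
  unfold Pre_find_dup_code; infer_instance

def pvWitness_find_dup_code : (List (String × String)) :=
  [("a", "X"), ("b", "X"), ("c", "Y"), ("d", "X")]

def Spec_find_dup_code (text2code : List (String × String)) (out : List (String × List String)) : Prop := out = find_dup_code_alt text2code
instance (text2code : List (String × String)) (out : List (String × List String)) : Decidable (Spec_find_dup_code text2code out) := by unfold Spec_find_dup_code; infer_instance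

-- ===== CLAIM (what is proved, stated in full; the proofs are below) =====
def Claim_equal_find_dup_code : Prop := ∀ (text2code : List (String × String)), Dom_find_dup_code text2code → Pre_find_dup_code text2code → Spec_find_dup_code text2code (find_dup_code text2code)

-- ===== LEMMAS AND PROOFS =====

/-- All texts mapped to code `c`, in order. -/
def textsIn (l : List (String × String)) (c : String) : List String :=
  (l.filter (fun q => q.2 == c)).map Prod.fst

lemma textsIn_append (p : List (String × String)) (t c c' : String) :
    textsIn (p ++ [(t, c)]) c' = textsIn p c' ++ (if c = c' then [t] else []) := by
  simp [textsIn, List.filter_append]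
  split_ifs with h <;> simp [h]

lemma count_codes (p : List (String × String)) (c : String) :
    (codesOf p).count c = (textsIn p c).length := by
  induction p with
  | nil => rfl
  | cons q p ih => by_cases h : q.2 = c <;> simp [codesOf, textsIn, h] <;>
      simpa [codesOf, textsIn] using ih

lemma codesOf_append_pair (p : List (String × String)) (t c : String) :
    codesOf (p ++ [(t, c)]) = codesOf p ++ [c] := by simp [codesOf]

lemma secondOcc_append (cs : List String) (c : String) :
    secondOcc (cs ++ [c]) = secondOcc cs ++ (if cs.count c = 1 then [c] else []) := by
  unfold secondOcc
  rw [List.zipIdx_append, List.filter_append, List.map_append]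
  congr 1
  · congr 1
    apply List.filter_congr
    intro x hx
    obtain ⟨_, hlt, _⟩ := List.mem_zipIdx (x := x.1) (i := x.2) (by simpa using hx)
    simp only [Nat.zero_add] at hlt
    rw [List.take_append_of_le_length (Nat.le_of_lt hlt)]
  · simp [List.zipIdx]
    split_ifs with h <;> simp [h]

lemma mem_secondOcc {cs : List String} {c : String} (h : c ∈ secondOcc cs) :
    2 ≤ cs.count c := by
  unfold secondOcc at h
  obtain ⟨x, hx, hfst⟩ := List.mem_map.mp h
  obtain ⟨hmem, hcond⟩ := List.mem_filter.mp hx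
  obtain ⟨x1, x2⟩ := x
  dsimp at hfst hcond
  subst hfst
  obtain ⟨_, hlt, hget⟩ := List.mem_zipIdx hmem
  simp only [Nat.zero_add, Nat.sub_zero] at hlt hget
  simp only [decide_eq_true_eq] at hcond
  have hmem2 : x1 ∈ cs.drop x2 := by
    have h0 : (cs.drop x2)[0]'(by simp; omega) = cs[x2] := by
      rw [List.getElem_drop]; congr 1
    rw [hget, ← h0]
    exact List.getElem_mem _
  have hcc : cs.count x1 = (cs.take x2).count x1 + (cs.drop x2).count x1 := by
    conv_lhs => rw [← List.take_append_drop x2 cs]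
    rw [List.count_append]
  have := List.count_pos_iff.mpr hmem2
  omega

lemma nodup_secondOcc (cs : List String) : (secondOcc cs).Nodup := by
  induction cs using List.reverseRecOn with
  | nil => simp [secondOcc]
  | append_singleton cs c ih =>
      rw [secondOcc_append]
      split_ifs with h
      · refine List.nodup_append.mpr ⟨ih, List.nodup_singleton _, ?_⟩
        intro a ha b hb hab
        simp only [List.mem_singleton] at hb
        subst hb; subst hab
        have := mem_secondOcc ha
        omega
      · simpa using ih

lemma modify_eq_insert {κ ν : Type} [BEq κ] (d : PySem.Dict κ ν) (k : κ) (d0 : ν) (f : ν → ν) :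
    d.modify k d0 f = d.insert k (f (d.getD k d0)) := rfl

lemma dupsFirst_char (L p : List (String × String)) (t c : String) :
    (PySem.List.dedup (codesOf (p ++ [(t, c)]))).filter
        (fun c' => decide (1 < (codesOf L).count c'))
      = (PySem.List.dedup (codesOf p)).filter (fun c' => decide (1 < (codesOf L).count c'))
        ++ (if c ∈ codesOf p ∨ ¬ 1 < (codesOf L).count c then [] else [c]) := by
  rw [codesOf_append_pair]
  simp only [PySem.List.dedup_eq_ofList, PySem.Set.ofList_append_singleton, PySem.Set.add]
  by_cases hm : c ∈ codesOf p
  · simp [PySem.Set.contains, PySem.Set.mem_ofList, hm]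
  · simp only [PySem.Set.contains]
    rw [if_neg (by simpa [PySem.Set.mem_ofList] using hm)]
    rw [List.filter_append]
    congr 1
    by_cases hc : 1 < (codesOf L).count c <;> simp [hm, hc]

lemma textsIn_eq_nil_of_not_mem {p : List (String × String)} {c : String}
    (h : c ∉ codesOf p) : textsIn p c = [] := by
  have := count_codes p c
  rw [List.count_eq_zero.mpr h] at this
  exact (List.length_eq_zero_iff.mp this.symm)

/-- Loop invariant for A's fold: after a processed prefix `p`, `c2t` holds each code's first
    text, `dup` maps each code seen at least twice to all its texts so far, and `dup`'s keys
    are in second-occurrence order. -/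
lemma A_loop (s : List (String × String)) :
    ∀ (p : List (String × String)) (dup : PySem.Dict String (List String))
      (c2t : PySem.Dict String String),
    (∀ c, c2t.get? c = (textsIn p c).head?) →
    (∀ c, dup.get? c = if 2 ≤ (textsIn p c).length then some (textsIn p c) else none) →
    dup.keys = secondOcc (codesOf p) →
    (let final := (s.foldl
        (fun (st : PySem.Dict String (List String) × PySem.Dict String String) q =>
          if st.2.contains q.2 = false then (st.1, st.2.insert q.2 q.1)
          else if st.1.contains q.2 then (st.1.modify q.2 [] (fun ts => ts ++ [q.1]), st.2)
          else (st.1.insert q.2 [st.2.getD q.2 "", q.1], st.2))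
        (dup, c2t)).1;
     (∀ c, final.get? c =
        if 2 ≤ (textsIn (p ++ s) c).length then some (textsIn (p ++ s) c) else none) ∧
     final.keys = secondOcc (codesOf (p ++ s))) := by
  induction s with
  | nil =>
      intro p dup c2t h1 h2 h3
      exact ⟨by simpa using h2, by simpa using h3⟩
  | cons x s ih =>
      intro p dup c2t h1 h2 h3
      obtain ⟨t, c⟩ := x
      rw [List.foldl_cons]
      dsimp only
      have hkey : secondOcc (codesOf (p ++ [(t, c)]))
          = secondOcc (codesOf p) ++ (if (codesOf p).count c = 1 then [c] else []) := by
        rw [codesOf_append_pair, secondOcc_append]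
      have hPS : p ++ (t, c) :: s = (p ++ [(t, c)]) ++ s := by simp
      rw [hPS]
      rcases Nat.lt_or_ge (textsIn p c).length 2 with hn2 | hn2
      · rcases Nat.eq_zero_or_pos (textsIn p c).length with hn0 | hn0
        · -- first occurrence of c
          have hemp : textsIn p c = [] := List.length_eq_zero_iff.mp hn0
          have hc2t : c2t.contains c = false := by
            rw [PySem.Dict.contains_eq_isSome_get?, h1, hemp]; rfl
          rw [if_pos hc2t]
          apply ih (p ++ [(t, c)]) dup (c2t.insert c t)
          · intro c'
            by_cases hc : c' = c
            · rw [hc, PySem.Dict.get?_insert, if_pos rfl, textsIn_append, if_pos rfl, hemp]; rfl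
            · rw [PySem.Dict.get?_insert, if_neg hc, textsIn_append,
                  if_neg (show ¬ c = c' from fun h => hc h.symm), List.append_nil]
              exact h1 c'
          · intro c'
            by_cases hc : c' = c
            · rw [hc, h2, textsIn_append, if_pos rfl, hemp]; simp
            · rw [textsIn_append, if_neg (show ¬ c = c' from fun h => hc h.symm),
                  List.append_nil]
              exact h2 c'
          · rw [hkey, if_neg (by rw [count_codes, hemp]; simp), List.append_nil]
            exact h3
        · -- second occurrence of c
          have hn1 : (textsIn p c).length = 1 := by omega
          obtain ⟨t0, hts⟩ : ∃ t0, textsIn p c = [t0] := by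
            cases hx : textsIn p c with
            | nil => rw [hx] at hn1; simp at hn1
            | cons a as => rw [hx] at hn1; simp at hn1; exact ⟨a, by rw [hn1]⟩
          have hc2t : c2t.contains c = true := by
            rw [PySem.Dict.contains_eq_isSome_get?, h1, hts]; rfl
          have hdupb : dup.contains c = false := by
            rw [PySem.Dict.contains_eq_isSome_get?, h2]; simp [hts]
          rw [if_neg (by simp [hc2t]), if_neg (by simp [hdupb])]
          have hgetD : c2t.getD c "" = t0 := by
            rw [PySem.Dict.getD_eq_get?_getD, h1, hts]; rfl
          rw [hgetD]
          apply ih (p ++ [(t, c)]) (dup.insert c [t0, t]) c2t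
          · intro c'
            by_cases hc : c' = c
            · rw [hc, h1, textsIn_append, if_pos rfl, hts]; rfl
            · rw [textsIn_append, if_neg (show ¬ c = c' from fun h => hc h.symm),
                  List.append_nil]
              exact h1 c'
          · intro c'
            by_cases hc : c' = c
            · rw [hc, PySem.Dict.get?_insert, if_pos rfl, textsIn_append, if_pos rfl, hts]; rfl
            · rw [PySem.Dict.get?_insert, if_neg hc, textsIn_append,
                  if_neg (show ¬ c = c' from fun h => hc h.symm), List.append_nil]
              exact h2 c'
          · rw [PySem.Dict.keys_insert_of_not_contains _ _ hdupb, hkey,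
                if_pos (by rw [count_codes, hts]; rfl), h3]
      · -- third or later occurrence of c
        have hne : textsIn p c ≠ [] := by
          intro hx; rw [hx] at hn2; simp at hn2
        have hc2t : c2t.contains c = true := by
          rw [PySem.Dict.contains_eq_isSome_get?, h1]
          cases hx : textsIn p c with
          | nil => exact absurd hx hne
          | cons a as => simp
        have hdupb : dup.contains c = true := by
          rw [PySem.Dict.contains_eq_isSome_get?, h2]; simp [hn2]
        rw [if_neg (by simp [hc2t]), if_pos hdupb]
        have hgetD : dup.getD c [] = textsIn p c := by
          rw [PySem.Dict.getD_eq_get?_getD, h2]; simp [hn2]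
        rw [modify_eq_insert, hgetD]
        apply ih (p ++ [(t, c)]) (dup.insert c (textsIn p c ++ [t])) c2t
        · intro c'
          by_cases hc : c' = c
          · rw [hc, h1, textsIn_append, if_pos rfl, List.head?_append]
            cases hx : textsIn p c with
            | nil => exact absurd hx hne
            | cons a as => simp
          · rw [textsIn_append, if_neg (show ¬ c = c' from fun h => hc h.symm),
                List.append_nil]
            exact h1 c'
        · intro c'
          by_cases hc : c' = c
          · have hlen2 : 2 ≤ (textsIn p c ++ [t]).length := by simp; omega
            rw [hc, PySem.Dict.get?_insert, if_pos rfl, textsIn_append, if_pos rfl,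
                if_pos hlen2]
          · rw [PySem.Dict.get?_insert, if_neg hc, textsIn_append,
                if_neg (show ¬ c = c' from fun h => hc h.symm), List.append_nil]
            exact h2 c'
        · rw [PySem.Dict.keys_insert_of_contains _ _ hdupb, hkey,
              if_neg (by rw [count_codes]; omega), List.append_nil]
          exact h3

/-- Loop invariant for B's grouping fold: after a processed prefix `p`, `dup` maps each
    globally-duplicated code seen in `p` to its texts so far, keys in first-occurrence order. -/
lemma B_loop (L : List (String × String)) (s : List (String × String)) :
    ∀ (p : List (String × String)) (dup : PySem.Dict String (List String)),
    (∀ c, dup.get? c =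
        if c ∈ codesOf p ∧ 1 < (codesOf L).count c then some (textsIn p c) else none) →
    dup.keys = (PySem.List.dedup (codesOf p)).filter (fun c => decide (1 < (codesOf L).count c)) →
    (let final := s.foldl
        (fun (dup : PySem.Dict String (List String)) q =>
          if 1 < (codesOf L).count q.2 then dup.insert q.2 (dup.getD q.2 [] ++ [q.1]) else dup)
        dup;
     (∀ c, final.get? c =
        if c ∈ codesOf (p ++ s) ∧ 1 < (codesOf L).count c then some (textsIn (p ++ s) c) else none) ∧
     final.keys = (PySem.List.dedup (codesOf (p ++ s))).filter
        (fun c => decide (1 < (codesOf L).count c))) := by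
  induction s with
  | nil =>
      intro p dup h1 h2
      exact ⟨by simpa using h1, by simpa using h2⟩
  | cons x s ih =>
      intro p dup h1 h2
      obtain ⟨t, c⟩ := x
      rw [List.foldl_cons]
      dsimp only
      have hPS : p ++ (t, c) :: s = (p ++ [(t, c)]) ++ s := by simp
      rw [hPS]
      have hmemapp : ∀ c', c' ∈ codesOf (p ++ [(t, c)]) ↔ c' ∈ codesOf p ∨ c' = c := by
        intro c'; rw [codesOf_append_pair]; simp
      by_cases hg : 1 < (codesOf L).count c
      · rw [if_pos hg]
        apply ih (p ++ [(t, c)]) (dup.insert c (dup.getD c [] ++ [t]))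
        · intro c'
          by_cases hc : c' = c
          · subst hc
            rw [PySem.Dict.get?_insert, if_pos rfl,
                if_pos ⟨(hmemapp c').mpr (Or.inr rfl), hg⟩,
                textsIn_append, if_pos rfl]
            congr 2
            rw [PySem.Dict.getD_eq_get?_getD, h1]
            by_cases hm : c' ∈ codesOf p
            · rw [if_pos ⟨hm, hg⟩]; rfl
            · rw [if_neg (by tauto), textsIn_eq_nil_of_not_mem hm]; rfl
          · rw [PySem.Dict.get?_insert, if_neg hc, h1, textsIn_append,
                if_neg (show ¬ c = c' from fun h => hc h.symm), List.append_nil]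
            congr 1
            rw [eq_iff_iff]
            constructor
            · exact fun ⟨hm, hd⟩ => ⟨(hmemapp c').mpr (Or.inl hm), hd⟩
            · rintro ⟨hm, hd⟩
              rcases (hmemapp c').mp hm with h | h
              · exact ⟨h, hd⟩
              · exact absurd h hc
        · rw [dupsFirst_char L, ← h2]
          by_cases hm : c ∈ codesOf p
          · have hcont : dup.contains c = true := by
              rw [PySem.Dict.contains_eq_isSome_get?, h1, if_pos ⟨hm, hg⟩]; rfl
            rw [PySem.Dict.keys_insert_of_contains _ _ hcont, if_pos (Or.inl hm),
                List.append_nil]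
          · have hcont : dup.contains c = false := by
              rw [PySem.Dict.contains_eq_isSome_get?, h1, if_neg (by tauto)]; rfl
            rw [PySem.Dict.keys_insert_of_not_contains _ _ hcont, if_neg (by tauto)]
      · rw [if_neg hg]
        apply ih (p ++ [(t, c)]) dup
        · intro c'
          by_cases hc : c' = c
          · subst hc
            rw [h1, if_neg (by tauto), if_neg (by tauto)]
          · rw [h1, textsIn_append,
                if_neg (show ¬ c = c' from fun h => hc h.symm), List.append_nil]
            congr 1
            rw [eq_iff_iff]
            constructor
            · exact fun ⟨hm, hd⟩ => ⟨(hmemapp c').mpr (Or.inl hm), hd⟩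
            · rintro ⟨hm, hd⟩
              rcases (hmemapp c').mp hm with h | h
              · exact ⟨h, hd⟩
              · exact absurd h hc
        · rw [dupsFirst_char L, if_pos (Or.inr hg), List.append_nil, h2]

/-- A's result: the duplicated codes in second-occurrence order, each with all its texts. -/
lemma A_char (l : List (String × String)) :
    find_dup_code l = (secondOcc (codesOf l)).map (fun c => (c, textsIn l c)) := by
  unfold find_dup_code
  obtain ⟨hget, hkeys⟩ := A_loop l [] PySem.Dict.empty PySem.Dict.empty
    (by intro c; simp [PySem.Dict.get?_empty, textsIn])
    (by intro c; simp [PySem.Dict.get?_empty, textsIn])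
    (by simp [PySem.Dict.keys_empty, secondOcc, codesOf])
  simp only [List.nil_append] at hget hkeys
  rw [PySem.Dict.items_eq_map_keys _ (hkeys ▸ nodup_secondOcc _) [], hkeys]
  apply List.map_congr_left
  intro k hk
  have h2 : 2 ≤ (textsIn l k).length := by
    rw [← count_codes]; exact mem_secondOcc hk
  rw [PySem.Dict.getD_eq_get?_getD, hget, if_pos h2]
  rfl

/-- B's result: the duplicated codes in first-occurrence order, each with all its texts. -/
lemma B_char (l : List (String × String)) :
    find_dup_code_alt l = (dupsFirst l).map (fun c => (c, textsIn l c)) := by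
  simp only [find_dup_code_alt]
  have hcounter : l.foldl (fun (d : PySem.Dict String Int) p => d.insert p.2 (d.getD p.2 0 + 1))
      PySem.Dict.empty = PySem.Dict.counter (codesOf l) := by
    rw [← PySem.Dict.foldl_insert_getD_add_one_eq_counter, codesOf, List.foldl_map]
  rw [hcounter]
  have hstep : (fun (dup : PySem.Dict String (List String)) (p : String × String) =>
        if (PySem.Dict.counter (codesOf l)).getD p.2 0 > 1 then
          dup.modify p.2 [] (fun ts => ts ++ [p.1]) else dup)
      = (fun (dup : PySem.Dict String (List String)) (q : String × String) =>
          if 1 < (codesOf l).count q.2 then dup.insert q.2 (dup.getD q.2 [] ++ [q.1]) else dup) := by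
    funext d q
    rw [PySem.Dict.getD_counter, modify_eq_insert]
    by_cases h : 1 < (codesOf l).count q.2
    · rw [if_pos h, if_pos (by exact_mod_cast h)]
    · rw [if_neg h, if_neg (by exact_mod_cast h)]
  rw [hstep]
  obtain ⟨hget, hkeys⟩ := B_loop l l [] PySem.Dict.empty
    (by intro c; simp [PySem.Dict.get?_empty, codesOf])
    (by simp [PySem.Dict.keys_empty, codesOf])
  simp only [List.nil_append] at hget hkeys
  have hnd : ((PySem.List.dedup (codesOf l)).filter
      (fun c => decide (1 < (codesOf l).count c))).Nodup :=
    (PySem.List.nodup_dedup _).filter _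
  rw [PySem.Dict.items_eq_map_keys _ (hkeys ▸ hnd) [], hkeys]
  apply List.map_congr_left
  intro k hk
  obtain ⟨hmem, hcnt⟩ := List.mem_filter.mp hk
  rw [PySem.List.mem_dedup] at hmem
  simp only [decide_eq_true_eq] at hcnt
  rw [PySem.Dict.getD_eq_get?_getD, hget, if_pos ⟨hmem, hcnt⟩]
  rfl

-- ===== VERDICT (by name: the statement is the Claim_ definition above) =====
theorem find_dup_code_spec : Claim_equal_find_dup_code := by
  intro l _hdom hpre
  show find_dup_code l = find_dup_code_alt l
  rw [A_char, B_char, hpre]
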